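-- pv_equiv track=rewrite | github.com/Joonior-Programmer/Leetcode | LeetCode/Easy/2441-largest-positive-integer-that-exists-with-its-negative/2441-largest-positive-integer-that-exists-with-its-negative.py | findMaxK
-- ===== SOURCE A (Python) =====
-- from typing import List
--
-- def findMaxK(nums: List[int]) -> int:
--     count = [False] * 2001
--
--     for v in nums:
--         count[v+1000] = True
--
--     for i in range(1000, 0, -1):
--         if count[i+1000] and count[1000-i]:
--             return i
--
--     return -1
-- ===== SOURCE B (Python) =====
-- def findMaxK(nums):
--     s = set(nums)
--     res = -1
--     for v in nums:
--         if v > 0 and -v in s: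
--             res = max(res, v)
--     return res
-- ===== Notes on version B (the rewrite author's own statement) =====
-- stated objective: idiomatic
-- what changed: Replaces the fixed 2001-slot boolean array plus descending range scan with early return by a set of the elements and a single element-driven pass maintaining a running maximum.
-- outside the precondition, e.g. on findMaxK([1500]): A raises IndexError, B returns -1; on findMaxK([-1001, -1000]): A returns 1000, B returns -1; on findMaxK([-3001, -1001]): A returns 1000, B returns -1
import Mathlib
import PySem

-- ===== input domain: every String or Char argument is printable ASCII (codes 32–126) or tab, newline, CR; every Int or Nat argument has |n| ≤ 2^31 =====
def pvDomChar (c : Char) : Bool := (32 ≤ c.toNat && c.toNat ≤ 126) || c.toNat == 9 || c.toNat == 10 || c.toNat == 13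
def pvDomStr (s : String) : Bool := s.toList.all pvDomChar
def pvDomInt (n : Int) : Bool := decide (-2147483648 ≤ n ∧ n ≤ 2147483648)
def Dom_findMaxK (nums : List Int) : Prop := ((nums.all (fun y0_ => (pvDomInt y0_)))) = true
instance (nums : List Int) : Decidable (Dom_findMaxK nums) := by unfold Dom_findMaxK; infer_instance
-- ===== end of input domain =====

-- B replaces A's fixed boolean array + descending range scan with early return by a
-- set of the elements and one element-driven pass keeping a running maximum (idiomatic).

-- ===== PORT A =====
-- the early-return loop 'for i in range(1000, 0, -1): if count[i+1000] and count[1000-i]: return i'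
def pvLoopA (c : List Bool) : List Int → Int
  | [] => -1
  | i :: rest =>
      if PySem.List.pyGetD c (i + 1000) false && PySem.List.pyGetD c (1000 - i) false then i
      else pvLoopA c rest

-- 'count[v+1000] = True' is pySetD (exact while the index is in range, i.e. on Pre_);
-- the reads in the loop are always in range for a 2001-slot list
def findMaxK (nums : List Int) : Int :=
  let count := nums.foldl (fun c v => PySem.List.pySetD c (v + 1000) true) (List.replicate 2001 false)
  pvLoopA count (PySem.List.pyRange 1000 0 (-1))

-- ===== PORT B =====
def findMaxK_alt (nums : List Int) : Int :=
  let s := PySem.Set.ofList nums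
  nums.foldl (fun res v => if v > 0 && PySem.Set.contains s (-v) then max res v else res) (-1)

-- ===== PRECONDITION & SPEC =====
-- Pre_ restricts to the task's natural domain [-1000, 1000] (the LeetCode constraint):
-- outside it A raises IndexError (elements > 1000 or < -3001) or, for elements in
-- [-3001, -1001], returns an accidental value via Python's negative-index wraparound.
def Pre_findMaxK (nums : List Int) : Prop := ∀ v ∈ nums, -1000 ≤ v ∧ v ≤ 1000
instance (nums : List Int) : Decidable (Pre_findMaxK nums) := by unfold Pre_findMaxK; infer_instance

def pvWitness_findMaxK : List Int := [3, -3, 7, 2, -2]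

def Spec_findMaxK (nums : List Int) (out : Int) : Prop := out = findMaxK_alt nums
instance (nums : List Int) (out : Int) : Decidable (Spec_findMaxK nums out) := by unfold Spec_findMaxK; infer_instance

-- ===== CLAIM (what is proved, stated in full; the proofs are below) =====
def Claim_equal_findMaxK : Prop := ∀ (nums : List Int), Dom_findMaxK nums → Pre_findMaxK nums → Spec_findMaxK nums (findMaxK nums)

-- ===== LEMMAS AND PROOFS =====

-- after the first loop, the count array reads back membership in nums
theorem pv_count_get (nums : List Int) (h : Pre_findMaxK nums)
    (c : List Bool) (hc : c.length = 2001) :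
    ∀ j : Int, 0 ≤ j → j ≤ 2000 →
      PySem.List.pyGetD (nums.foldl (fun c v => PySem.List.pySetD c (v + 1000) true) c) j false
        = (PySem.List.pyGetD c j false || decide ((j - 1000) ∈ nums)) := by
  induction nums generalizing c with
  | nil => intro j _ _; simp
  | cons v t ih =>
    intro j hj0 hj1
    have hv := h v (List.mem_cons_self)
    have hPre : Pre_findMaxK t := fun x hx => h x (List.mem_cons_of_mem _ hx)
    have hlen : (PySem.List.pySetD c (v + 1000) true).length = 2001 := by
      rw [PySem.List.length_pySetD]; exact hc
    simp only [List.foldl_cons]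
    rw [ih hPre _ hlen j hj0 hj1]
    have hvc : (v + 1000) = (((v + 1000).toNat : Nat) : Int) := by omega
    have hjc : j = ((j.toNat : Nat) : Int) := by omega
    have hn : (v + 1000).toNat < c.length := by omega
    rw [hvc, hjc, PySem.List.pyGetD_pySetD_natCast c _ _ true false hn]
    by_cases he : j.toNat = (v + 1000).toNat
    · simp [he, List.mem_cons]
      rw [show max (v + 1000) 0 = v + 1000 by omega]
      exact Or.inr (Or.inl (by omega))
    · have hne : j - 1000 ≠ v := by omega
      simp [he, List.mem_cons]
      rw [show max j 0 = j by omega]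
      simp [hne]

-- descending maximum search, spec-level recursion
def pvBestDesc (P : Int → Bool) : Nat → Int
  | 0 => -1
  | k + 1 => if P (k + 1) then (k + 1 : Int) else pvBestDesc P k

theorem pv_bestDesc_congr (P Q : Int → Bool) (n : Nat)
    (h : ∀ i : Int, 1 ≤ i → i ≤ n → P i = Q i) : pvBestDesc P n = pvBestDesc Q n := by
  induction n with
  | zero => rfl
  | succ k ih =>
    have hk : P (k + 1 : Int) = Q (k + 1 : Int) := h _ (by omega) (by push_cast; omega)
    simp only [pvBestDesc]
    push_cast at hk
    rw [hk, ih (fun i h1 h2 => h i h1 (by omega))]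

theorem pv_bestDesc_spec (P : Int → Bool) (n : Nat) :
    (pvBestDesc P n = -1 ∧ ∀ i : Int, 1 ≤ i → i ≤ n → P i = false) ∨
    (P (pvBestDesc P n) = true ∧ 1 ≤ pvBestDesc P n ∧ pvBestDesc P n ≤ n ∧
      ∀ i : Int, pvBestDesc P n < i → i ≤ n → P i = false) := by
  induction n with
  | zero => left; exact ⟨rfl, fun i h1 h2 => absurd (h1.trans h2) (by norm_num)⟩
  | succ k ih =>
    by_cases h : P ((k + 1 : Nat) : Int) = true
    · right
      simp only [pvBestDesc]
      rw [show ((k : Int) + 1) = ((k + 1 : Nat) : Int) by push_cast; ring]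
      rw [if_pos h]
      exact ⟨h, by push_cast; omega, by push_cast; omega, fun i h1 h2 => by push_cast at h1 h2; omega⟩
    · have hf : P ((k + 1 : Nat) : Int) = false := by revert h; cases P ((k + 1 : Nat) : Int) <;> simp
      have hunf : pvBestDesc P (k + 1) = pvBestDesc P k := by
        simp only [pvBestDesc]
        rw [show ((k : Int) + 1) = ((k + 1 : Nat) : Int) by push_cast; ring, if_neg h]
      rw [hunf]
      rcases ih with ⟨h1, h2⟩ | ⟨h1, h2, h3, h4⟩
      · left
        refine ⟨h1, fun i hi1 hi2 => ?_⟩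
        by_cases hik : i ≤ (k : Int)
        · exact h2 i hi1 hik
        · have : i = ((k + 1 : Nat) : Int) := by push_cast at hi2 ⊢; omega
          rw [this]; exact hf
      · right
        refine ⟨h1, h2, by push_cast; omega, fun i hi1 hi2 => ?_⟩
        by_cases hik : i ≤ (k : Int)
        · exact h4 i hi1 hik
        · have : i = ((k + 1 : Nat) : Int) := by push_cast at hi2 ⊢; omega
          rw [this]; exact hf

theorem pv_loopA_eq (c : List Bool) (n : Nat) :
    pvLoopA c (PySem.List.pyRange n 0 (-1))
      = pvBestDesc (fun i => PySem.List.pyGetD c (i + 1000) false && PySem.List.pyGetD c (1000 - i) false) n := by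
  induction n with
  | zero => rw [PySem.List.pyRange_neg_one_eq_nil (by norm_num)]; rfl
  | succ k ih =>
    rw [PySem.List.pyRange_neg_one_cons (by push_cast; omega)]
    simp only [pvLoopA, pvBestDesc]
    rw [show ((k + 1 : Nat) : Int) - 1 = (k : Int) by push_cast; ring] at *
    rw [show ((k : Int) + 1) = ((k + 1 : Nat) : Int) by push_cast; ring]
    rw [ih]

-- B's running-maximum fold: lower bound, provenance of the result, upper bound
theorem pv_fold_spec (C : Int → Bool) (l : List Int) (a : Int) :
    a ≤ l.foldl (fun res v => if C v then max res v else res) a ∧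
    (l.foldl (fun res v => if C v then max res v else res) a = a ∨
      (C (l.foldl (fun res v => if C v then max res v else res) a) = true ∧
       l.foldl (fun res v => if C v then max res v else res) a ∈ l)) ∧
    (∀ v ∈ l, C v = true → v ≤ l.foldl (fun res v => if C v then max res v else res) a) := by
  induction l generalizing a with
  | nil => exact ⟨le_refl a, Or.inl rfl, by simp⟩
  | cons v t ih =>
    simp only [List.foldl_cons]
    set a' := if C v then max a v else a with ha'
    obtain ⟨ih1, ih2, ih3⟩ := ih a'
    have haa' : a ≤ a' := by rw [ha']; split <;> simp
    refine ⟨le_trans haa' ih1, ?_, ?_⟩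
    · rcases ih2 with h | ⟨hc, hm⟩
      · rw [h, ha']
        by_cases hcv : C v = true
        · rcases le_total v a with hle | hle
          · left; simp [hcv, max_eq_left hle]
          · right; rw [if_pos hcv, max_eq_right hle]; exact ⟨hcv, List.mem_cons_self⟩
        · left; simp [hcv]
      · right; exact ⟨hc, List.mem_cons_of_mem _ hm⟩
    · intro u hu hcu
      rcases List.mem_cons.mp hu with rfl | hm
      · refine le_trans ?_ ih1; rw [ha', if_pos hcu]; exact le_max_right a u
      · exact ih3 u hm hcu

theorem pv_contains_ofList (l : List Int) (x : Int) :
    PySem.Set.contains (PySem.Set.ofList l) x = decide (x ∈ l) := by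
  simp [PySem.Set.contains, PySem.Set.mem_ofList]

theorem pv_main (nums : List Int) (hPre : Pre_findMaxK nums) : findMaxK nums = findMaxK_alt nums := by
  set cnt := nums.foldl (fun c v => PySem.List.pySetD c (v + 1000) true) (List.replicate 2001 false) with hcnt
  set Q : Int → Bool := fun i => decide (i ∈ nums) && decide (-i ∈ nums) with hQ
  set C : Int → Bool := fun v => decide (v > 0) && PySem.Set.contains (PySem.Set.ofList nums) (-v) with hC
  have hget : ∀ j : Int, 0 ≤ j → j ≤ 2000 →
      PySem.List.pyGetD cnt j false = decide ((j - 1000) ∈ nums) := by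
    intro j h0 h1
    rw [hcnt, pv_count_get nums hPre _ (by rw [List.length_replicate]) j h0 h1,
        PySem.List.pyGetD_of_nonneg _ _ h0,
        List.getD_replicate false (show j.toNat < 2001 by omega)]
    simp
  have hA : findMaxK nums = pvBestDesc Q 1000 := by
    show pvLoopA cnt (PySem.List.pyRange 1000 0 (-1)) = _
    rw [show (1000 : Int) = ((1000 : Nat) : Int) by norm_num, pv_loopA_eq]
    apply pv_bestDesc_congr
    intro i h1 h2
    rw [hget (i + 1000) (by omega) (by push_cast at h2; omega),
        hget (1000 - i) (by push_cast at h2; omega) (by omega),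
        show i + 1000 - 1000 = i by ring, show 1000 - i - 1000 = -i by ring]
  have hB : findMaxK_alt nums = nums.foldl (fun res v => if C v then max res v else res) (-1) := rfl
  obtain ⟨hB1, hB2, hB3⟩ := pv_fold_spec C nums (-1)
  set r := nums.foldl (fun res v => if C v then max res v else res) (-1) with hr
  rw [hA, hB]
  rcases pv_bestDesc_spec Q 1000 with ⟨h1, h2⟩ | ⟨hq, hb1, hb2, hmax⟩
  · rw [h1]
    rcases hB2 with h | ⟨hc, hm⟩
    · omega
    · exfalso
      rw [hC] at hc
      simp only [pv_contains_ofList, Bool.and_eq_true, decide_eq_true_eq] at hc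
      have hQr : Q r = true := by simp [hQ, hm, hc.2]
      have := h2 r (by omega) (by have := (hPre r hm).2; push_cast; omega)
      rw [this] at hQr; exact Bool.false_ne_true hQr
  · simp only [hQ, Bool.and_eq_true, decide_eq_true_eq] at hq
    have hCr : C (pvBestDesc Q 1000) = true := by
      rw [hC]
      simp only [pv_contains_ofList, Bool.and_eq_true, decide_eq_true_eq]
      exact ⟨by omega, hq.2⟩
    have hle : pvBestDesc Q 1000 ≤ r := hB3 _ hq.1 hCr
    rcases hB2 with h | ⟨hc, hm⟩
    · omega
    · rw [hC] at hc
      simp only [pv_contains_ofList, Bool.and_eq_true, decide_eq_true_eq] at hc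
      have hQr : Q r = true := by simp [hQ, hm, hc.2]
      by_cases hgt : pvBestDesc Q 1000 < r
      · have := hmax r hgt (by have := (hPre r hm).2; push_cast; omega)
        rw [this] at hQr; exact absurd hQr Bool.false_ne_true
      · omega

-- ===== VERDICT (by name: the statement is the Claim_ definition above) =====
theorem findMaxK_spec : Claim_equal_findMaxK := by
  intro nums _ hPre
  unfold Spec_findMaxK
  exact pv_main nums hPre
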